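-- pv_equiv track=rewrite | github.com/borko81/algorithms_with_python | first_ten/fill_the_blanks.py | solution
-- ===== SOURCE A (Python) =====
-- def solution(array: list):
--     new_arr = []
--     not_null = 0
--     for n in array:
--         if n is not None:
--             new_arr.append(n)
--             not_null = n
--         else:
--             new_arr.append(not_null)
--     return new_arr
-- ===== SOURCE B (Python) =====
-- def solution(array: list):
--     def last_value(i):
--         for j in range(i, -1, -1):
--             if array[j] is not None:
--                 return array[j]
--         return 0
--     return [last_value(i) for i in range(len(array))]
-- ===== Notes on version B (the rewrite author's own statement) =====
-- stated objective: alternative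
-- what changed: Replaces the single forward pass with a carried last-non-null accumulator by a per-index computation: each output element is found independently by scanning backwards from its position for the nearest non-None value (0 if none), trading worst-case O(n) for O(n^2) with no carried state.
import Mathlib
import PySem

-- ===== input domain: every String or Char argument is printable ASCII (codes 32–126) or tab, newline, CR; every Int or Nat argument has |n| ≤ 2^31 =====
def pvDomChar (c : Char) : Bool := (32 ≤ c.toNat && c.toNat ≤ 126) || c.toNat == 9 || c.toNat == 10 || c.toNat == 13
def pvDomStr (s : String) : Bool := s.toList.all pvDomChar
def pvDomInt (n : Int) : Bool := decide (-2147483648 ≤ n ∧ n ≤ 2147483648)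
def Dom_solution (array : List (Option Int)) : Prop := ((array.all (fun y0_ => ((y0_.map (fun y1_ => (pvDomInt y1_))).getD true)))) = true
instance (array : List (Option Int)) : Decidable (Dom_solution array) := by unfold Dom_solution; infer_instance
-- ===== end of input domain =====

-- B computes each output element independently by a backward index scan from that position for the nearest non-None value (0 if none), instead of A's single forward pass with a carried accumulator; objective: alternative.


-- ===== PORT A =====
def solution (array : List (Option Int)) : List Int :=
  (array.foldl
    (fun (st : List Int × Int) n =>
      match n with
      | some v => (st.1 ++ [v], v)
      | none => (st.1 ++ [st.2], st.2))
    ([], 0)).1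

-- ===== PORT B =====
-- inner helper last_value(i): 'for j in range(i, -1, -1): if array[j] is not None: return array[j]; return 0'
-- as a downward recursion on j; array[j] via getD is exact here since every j reached satisfies j < array.length
def lastValue (array : List (Option Int)) : Nat → Int
  | 0 => match array.getD 0 none with
         | some v => v
         | none => 0
  | j + 1 => match array.getD (j + 1) none with
             | some v => v
             | none => lastValue array j

def solution_alt (array : List (Option Int)) : List Int :=
  (List.range array.length).map (fun i => lastValue array i)

-- ===== PRECONDITION & SPEC =====
def Spec_solution (array : List (Option Int)) (out : List Int) : Prop := out = solution_alt array
instance (array : List (Option Int)) (out : List Int) : Decidable (Spec_solution array out) := by unfold Spec_solution; infer_instance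

-- ===== CLAIM (what is proved, stated in full; the proofs are below) =====
def Claim_equal_solution : Prop := ∀ (array : List (Option Int)), Dom_solution array → Spec_solution array (solution array)

-- ===== LEMMAS AND PROOFS =====

-- forward fill with carried value nn (the recursive shape of A's loop)
def fillF (nn : Int) : List (Option Int) → List Int
  | [] => []
  | some v :: t => v :: fillF v t
  | none :: t => nn :: fillF nn t

-- last non-None of a prefix, with fallback nn
def lastF (nn : Int) (pfx : List (Option Int)) : Int :=
  match pfx.reverse.find? Option.isSome with
  | some (some v) => v
  | _ => nn

theorem lastF_cons (nn : Int) (h : Option Int) (p : List (Option Int)) :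
    lastF nn (h :: p) = lastF (h.getD nn) p := by
  unfold lastF
  simp only [List.reverse_cons, List.find?_append]
  cases hp : p.reverse.find? Option.isSome with
  | some x =>
    have := List.find?_some hp
    cases x with
    | some v => simp
    | none => simp at this
  | none => cases h <;> simp

theorem lastF_snoc (nn : Int) (p : List (Option Int)) (x : Option Int) :
    lastF nn (p ++ [x]) = match x with | some v => v | none => lastF nn p := by
  unfold lastF
  cases x <;> simp

theorem solution_fold (array : List (Option Int)) (acc : List Int) (nn : Int) :
    (array.foldl
      (fun (st : List Int × Int) n =>
        match n with
        | some v => (st.1 ++ [v], v)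
        | none => (st.1 ++ [st.2], st.2))
      (acc, nn)).1 = acc ++ fillF nn array := by
  induction array generalizing acc nn with
  | nil => simp [fillF]
  | cons h t ih =>
    cases h with
    | some v => simp [List.foldl, fillF, ih]
    | none => simp [List.foldl, fillF, ih]

theorem fillF_eq_map (array : List (Option Int)) (nn : Int) :
    fillF nn array = (List.range array.length).map (fun i => lastF nn (array.take (i + 1))) := by
  induction array generalizing nn with
  | nil => simp [fillF]
  | cons h t ih =>
    have hd : lastF nn [h] = h.getD nn := by cases h <;> simp [lastF]
    have step : ∀ i : ℕ, lastF nn ((h :: t).take (i + 1 + 1)) = lastF (h.getD nn) (t.take (i + 1)) := by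
      intro i
      simp only [List.take_succ_cons]
      exact lastF_cons nn h (t.take (i + 1))
    cases h with
    | some v =>
      simp only [fillF, List.length_cons, List.range_succ_eq_map, List.map_cons, List.map_map]
      refine congrArg₂ _ ?_ ?_
      · simpa using hd.symm
      · rw [ih v]
        refine List.map_congr_left ?_
        intro i _
        simpa [Function.comp, Nat.succ_eq_add_one] using (step i).symm
    | none =>
      simp only [fillF, List.length_cons, List.range_succ_eq_map, List.map_cons, List.map_map]
      refine congrArg₂ _ ?_ ?_
      · simpa using hd.symm
      · rw [ih nn]
        refine List.map_congr_left ?_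
        intro i _
        simpa [Function.comp, Nat.succ_eq_add_one] using (step i).symm

theorem lastValue_eq_lastF (array : List (Option Int)) (i : Nat) (hi : i < array.length) :
    lastValue array i = lastF 0 (array.take (i + 1)) := by
  induction i with
  | zero =>
    have h0 : array.take 1 = [array[0]] := by
      cases array with
      | nil => simp at hi
      | cons a t => simp
    rw [h0]
    have : array.getD 0 none = array[0] := List.getD_eq_getElem array none hi
    unfold lastValue
    rw [this]
    cases hx : array[0] <;> simp [lastF]
  | succ j ihj =>
    have hj : j < array.length := Nat.lt_of_succ_lt hi
    have htake : array.take (j + 1 + 1) = array.take (j + 1) ++ [array[j + 1]] :=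
      List.take_succ_eq_append_getElem hi
    rw [htake, lastF_snoc]
    have hget : array.getD (j + 1) none = array[j + 1] := List.getD_eq_getElem array none hi
    unfold lastValue
    rw [hget]
    cases hx : array[j + 1] with
    | some v => simp
    | none => simpa using ihj hj

-- ===== VERDICT (by name: the statement is the Claim_ definition above) =====
theorem solution_spec : Claim_equal_solution := by
  intro array _
  unfold Spec_solution solution solution_alt
  rw [solution_fold array [] 0, fillF_eq_map array 0]
  simp only [List.nil_append]
  refine List.map_congr_left ?_
  intro i hi
  exact (lastValue_eq_lastF array i (List.mem_range.mp hi)).symm
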